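-- pv_equiv track=rewrite | github.com/sasen-git/vhh-designer | tools/dedup_annotated_imgt.py | first_unique_header_indices
-- ===== SOURCE A (Python) =====
-- from typing import List, Dict
--
-- def first_unique_header_indices(header: List[str]) -> List[int]:
--     seen = set()
--     keep = []
--     for i, h in enumerate(header):
--         if h not in seen:
--             seen.add(h)
--             keep.append(i)
--     return keep
-- ===== SOURCE B (Python) =====
-- def first_unique_header_indices(header):
--     # Distinct headers in first-occurrence order, then recover each first index by scanning.
--     return [header.index(h) for h in dict.fromkeys(header)]
-- ===== Notes on version B (the rewrite author's own statement) =====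
-- stated objective: idiomatic
-- what changed: Replaces the single-pass seen-set loop with a two-phase decomposition: build the distinct headers with dict.fromkeys, then recover each first index with header.index.
import Mathlib
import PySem

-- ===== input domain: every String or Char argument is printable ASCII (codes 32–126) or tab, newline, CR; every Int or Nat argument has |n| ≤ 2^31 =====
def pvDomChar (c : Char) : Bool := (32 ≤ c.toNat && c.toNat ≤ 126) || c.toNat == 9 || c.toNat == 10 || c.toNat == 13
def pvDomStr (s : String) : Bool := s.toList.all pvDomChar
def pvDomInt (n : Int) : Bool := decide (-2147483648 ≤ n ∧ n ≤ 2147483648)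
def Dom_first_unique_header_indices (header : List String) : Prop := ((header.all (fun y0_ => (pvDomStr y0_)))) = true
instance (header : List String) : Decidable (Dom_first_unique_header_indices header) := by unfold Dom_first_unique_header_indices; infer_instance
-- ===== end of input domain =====

-- B re-implements first_unique_header_indices as "distinct headers via dict.fromkeys, then header.index
-- per key" instead of A's single seen-set pass — an idiomatic two-phase decomposition, not faster.
-- ===== PORT A =====
-- A: one pass with a seen-set, appending the index at each first occurrence.
def first_unique_header_indices (header : List String) : List Int :=
  ((PySem.List.enumerate header).foldl
    (fun st p =>
      if PySem.Set.contains st.1 p.2 then st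
      else (PySem.Set.add st.1 p.2, st.2 ++ [p.1]))
    ((PySem.Set.empty : PySem.Set String), ([] : List Int))).2

-- ===== PORT B =====
-- B: distinct headers via dict.fromkeys (= PySem.List.dedup), then header.index per key.
-- header.index(h) never raises here (h ∈ header), so index? is always some; getD 0 is unreachable.
def first_unique_header_indices_alt (header : List String) : List Int :=
  (PySem.List.dedup header).map (fun h => (((PySem.List.index? header h).getD 0 : Nat) : Int))

-- ===== PRECONDITION & SPEC =====
def Spec_first_unique_header_indices (header : List String) (out : List Int) : Prop := out = first_unique_header_indices_alt header
instance (header : List String) (out : List Int) : Decidable (Spec_first_unique_header_indices header out) := by unfold Spec_first_unique_header_indices; infer_instance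

-- ===== CLAIM (what is proved, stated in full; the proofs are below) =====
def Claim_equal_first_unique_header_indices : Prop := ∀ (header : List String), Dom_first_unique_header_indices header → Spec_first_unique_header_indices header (first_unique_header_indices header)

-- ===== LEMMAS AND PROOFS =====

-- the fold's step function, named for the proofs
def stepA (st : PySem.Set String × List Int) (p : Int × String) : PySem.Set String × List Int :=
  if PySem.Set.contains st.1 p.2 then st else (PySem.Set.add st.1 p.2, st.2 ++ [p.1])

lemma A_eq_foldl (l : List String) :
    first_unique_header_indices l = ((PySem.List.enumerate l).foldl stepA (PySem.Set.empty, [])).2 := rfl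

-- the seen-set after processing l is seen updated with l's elements
lemma loop_fst : ∀ (l : List String) (s : Int) (seen : PySem.Set String) (keep : List Int),
    ((PySem.List.enumerate l s).foldl stepA (seen, keep)).1 = PySem.Set.update seen l := by
  intro l
  induction l with
  | nil => intro s seen keep; simp [PySem.List.enumerate_nil, PySem.Set.update_nil]
  | cons x xs ih =>
    intro s seen keep
    rw [PySem.List.enumerate_cons, List.foldl_cons, PySem.Set.update_cons]
    by_cases hx : x ∈ seen
    · have hc : PySem.Set.contains seen x = true := (PySem.Set.contains_iff _ _).mpr hx
      simp only [stepA, hc, if_pos]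
      rw [PySem.Set.add_of_mem hx, ih]
    · have hc : PySem.Set.contains seen x ≠ true := fun h => hx ((PySem.Set.contains_iff _ _).mp h)
      simp only [stepA, hc]
      exact ih _ _ _

-- B as a map over set(l)
lemma B_eq (l : List String) :
    first_unique_header_indices_alt l
      = (PySem.Set.ofList l).map (fun h => (((PySem.List.index? l h).getD 0 : Nat) : Int)) := by
  simp [first_unique_header_indices_alt, PySem.List.dedup_eq_ofList]

lemma AB_eq : ∀ (header : List String),
    first_unique_header_indices header = first_unique_header_indices_alt header := by
  intro header
  induction header using List.reverseRecOn with
  | nil => decide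
  | append_singleton l x ih =>
    rw [A_eq_foldl, PySem.List.enumerate_append, List.foldl_append, B_eq,
        PySem.Set.ofList_append_singleton]
    have hfst := loop_fst l 0 PySem.Set.empty []
    rw [PySem.Set.update_empty] at hfst
    have hmap : ∀ (t : List String),
        (PySem.Set.ofList l).map (fun h => (((PySem.List.index? (l ++ t) h).getD 0 : Nat) : Int))
          = first_unique_header_indices l := by
      intro t
      rw [ih, B_eq]
      exact List.map_congr_left (fun h hh => by
        rw [PySem.List.index?_append_of_mem t ((PySem.Set.mem_ofList l h).mp hh)])
    rw [PySem.List.enumerate_cons, PySem.List.enumerate_nil, List.foldl_cons, List.foldl_nil]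
    by_cases hx : x ∈ l
    · have hc : PySem.Set.contains (PySem.Set.ofList l) x = true :=
        (PySem.Set.contains_iff _ _).mpr ((PySem.Set.mem_ofList l x).mpr hx)
      simp only [stepA, hfst, hc, if_pos]
      rw [PySem.Set.add_of_mem ((PySem.Set.mem_ofList l x).mpr hx), hmap]
      exact A_eq_foldl l
    · have hc : PySem.Set.contains (PySem.Set.ofList l) x ≠ true := fun h =>
        hx ((PySem.Set.mem_ofList l x).mp ((PySem.Set.contains_iff _ _).mp h))
      simp only [stepA, hfst, hc]
      rw [PySem.Set.add_of_not_mem (fun h => hx ((PySem.Set.mem_ofList l x).mp h)),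
          List.map_append, hmap, List.map_singleton,
          PySem.List.index?_append_singleton_self l x hx, A_eq_foldl l]
      simp

theorem first_unique_header_indices_spec : Claim_equal_first_unique_header_indices :=
  fun header _ => AB_eq header
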